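-- pv_equiv track=rewrite | github.com/chetanxpatil/livnium | cortex_v1/mps/tests/test_r55_sandbox.py | count_mono_k3
-- ===== SOURCE A (Python) =====
-- def count_mono_k3(coloring, edges, nbrs):
--     """Count monochromatic triangles (slow, for validation only)."""
--     n = len(nbrs)
--     count = 0
--     for u in range(n):
--         for v, _ in nbrs[u]:
--             if v <= u: continue
--             for w, _ in nbrs[u]:
--                 if w <= v: continue
--                 eu = coloring.get((min(u,v), max(u,v)), 0)
--                 ev = coloring.get((min(u,w), max(u,w)), 0)
--                 ew = coloring.get((min(v,w), max(v,w)), 0)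
--                 if eu == ev == ew:
--                     count += 1
--     return count
-- ===== SOURCE B (Python) =====
-- def count_mono_k3(coloring, edges, nbrs):
--     """Count monochromatic triangles by grouping each vertex's forward
--     neighbors into per-color buckets, so the two wedge-color checks of the
--     naive version hold by construction and only the (v, w) edge is tested."""
--     total = 0
--     for u, row in enumerate(nbrs):
--         pairs = [(coloring.get((u, v), 0), v) for v, _ in row if v > u]
--         buckets = {}
--         for c, v in pairs:
--             buckets.setdefault(c, []).append(v)
--         for c, vs in buckets.items():
--             for v in vs:
--                 for w in vs:
--                     if v < w and coloring.get((v, w), 0) == c: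
--                         total += 1
--     return total
-- ===== Notes on version B (the rewrite author's own statement) =====
-- stated objective: alternative
-- what changed: B replaces A's triple check of wedge colors on every (v,w) pair with a per-vertex color->bucket dict of forward neighbors, so eu==ev holds by construction and only the (v,w) edge color is tested within each bucket.
import Mathlib
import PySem

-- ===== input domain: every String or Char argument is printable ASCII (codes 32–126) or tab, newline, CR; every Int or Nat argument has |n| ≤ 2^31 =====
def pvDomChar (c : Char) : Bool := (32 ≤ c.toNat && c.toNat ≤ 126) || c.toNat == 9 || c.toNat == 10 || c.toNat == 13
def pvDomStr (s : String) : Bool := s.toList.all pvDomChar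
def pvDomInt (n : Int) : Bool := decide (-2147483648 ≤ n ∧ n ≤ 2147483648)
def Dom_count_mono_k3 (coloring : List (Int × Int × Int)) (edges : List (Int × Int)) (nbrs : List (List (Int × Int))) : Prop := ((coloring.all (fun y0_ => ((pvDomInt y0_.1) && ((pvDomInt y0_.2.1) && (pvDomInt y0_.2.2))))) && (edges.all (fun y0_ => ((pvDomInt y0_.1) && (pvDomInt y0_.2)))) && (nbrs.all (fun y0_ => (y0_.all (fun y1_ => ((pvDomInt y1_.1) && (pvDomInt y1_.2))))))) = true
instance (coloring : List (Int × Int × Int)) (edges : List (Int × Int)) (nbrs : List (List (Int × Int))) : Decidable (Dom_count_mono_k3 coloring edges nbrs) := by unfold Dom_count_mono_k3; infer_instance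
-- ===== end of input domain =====

-- B groups each vertex's forward neighbors into per-color buckets (a dict color -> occurrences),
-- so only the (v,w) edge color is tested per candidate pair; same results, different decomposition.


-- shared helper: coloring.get((a,b), 0) — first-match lookup in the association list
def cget (coloring : List (Int × Int × Int)) (a b : Int) : Int :=
  match coloring.find? (fun t => t.1 == a && t.2.1 == b) with
  | some t => t.2.2
  | none => 0

-- ===== PORT A =====
def count_mono_k3 (coloring : List (Int × Int × Int)) (edges : List (Int × Int)) (nbrs : List (List (Int × Int))) : Int :=
  -- for u in range(n): nbrs[u] — u always in range, so pyGetD's default is never used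
  (PySem.List.pyRange 0 (nbrs.length : Int) 1).foldl (fun count u =>
    (PySem.List.pyGetD nbrs u []).foldl (fun count p =>
      let v := p.1
      if v ≤ u then count else
        (PySem.List.pyGetD nbrs u []).foldl (fun count q =>
          let w := q.1
          if w ≤ v then count else
            let eu := cget coloring (min u v) (max u v)
            let ev := cget coloring (min u w) (max u w)
            let ew := cget coloring (min v w) (max v w)
            if eu = ev ∧ ev = ew then count + 1 else count) count) count) 0

-- ===== PORT B =====
def count_mono_k3_alt (coloring : List (Int × Int × Int)) (edges : List (Int × Int)) (nbrs : List (List (Int × Int))) : Int :=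
  (PySem.List.enumerate nbrs 0).foldl (fun total ur =>
    let u := ur.1
    let pairs := (ur.2.filter (fun p => u < p.1)).map (fun p => (cget coloring u p.1, p.1))
    let buckets := pairs.foldl (fun d p => d.modify p.1 ([] : List Int) (· ++ [p.2])) PySem.Dict.empty
    buckets.items.foldl (fun total cv =>
      cv.2.foldl (fun total v =>
        cv.2.foldl (fun total w =>
          if v < w ∧ cget coloring v w = cv.1 then total + 1 else total) total) total) total) 0

-- ===== PRECONDITION & SPEC =====
def Spec_count_mono_k3 (coloring : List (Int × Int × Int)) (edges : List (Int × Int)) (nbrs : List (List (Int × Int))) (out : Int) : Prop := out = count_mono_k3_alt coloring edges nbrs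
instance (coloring : List (Int × Int × Int)) (edges : List (Int × Int)) (nbrs : List (List (Int × Int))) (out : Int) : Decidable (Spec_count_mono_k3 coloring edges nbrs out) := by unfold Spec_count_mono_k3; infer_instance

-- ===== CLAIM (what is proved, stated in full; the proofs are below) =====
def Claim_equal_count_mono_k3 : Prop := ∀ (coloring : List (Int × Int × Int)) (edges : List (Int × Int)) (nbrs : List (List (Int × Int))), Dom_count_mono_k3 coloring edges nbrs → Spec_count_mono_k3 coloring edges nbrs (count_mono_k3 coloring edges nbrs)

-- ===== LEMMAS AND PROOFS =====

-- a 0-outside-the-filter sum collapses to a sum over the filter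
lemma sum_ite_filter {α : Type} (l : List α) (p : α → Prop) [DecidablePred p] (t : α → Int) :
    (l.map (fun x => if p x then t x else 0)).sum = ((l.filter (fun x => decide (p x))).map t).sum := by
  induction l with
  | nil => rfl
  | cons x l ih =>
    by_cases h : p x <;> simp [h, ih]

-- a sum that hits a nodup list in at most one place
lemma sum_single (cs : List Int) (hnd : cs.Nodup) (a : Int) (h : Int → Int) :
    (cs.map (fun c => if a = c then h c else 0)).sum = if a ∈ cs then h a else 0 := by
  induction cs with
  | nil => simp
  | cons c cs ih =>
    rcases List.nodup_cons.mp hnd with ⟨hc, hnd'⟩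
    by_cases hac : a = c
    · subst hac
      have h0 : (cs.map (fun c' => if a = c' then h c' else 0)).sum = 0 := by
        rw [ih hnd']
        simp [hc]
      simp [h0]
    · simp [hac, ih hnd', List.mem_cons]

-- fiberwise grouping: summing bucket-by-bucket over a covering nodup color list
lemma group_sum (cs : List Int) (hnd : cs.Nodup) (xs : List Int) (g : Int → Int)
    (G : Int → Int → Int) (hcov : ∀ v ∈ xs, g v ∈ cs) :
    (cs.map (fun c => ((xs.filter (fun v => g v == c)).map (G c)).sum)).sum
      = (xs.map (fun v => G (g v) v)).sum := by
  induction xs with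
  | nil => simp
  | cons v xs ih =>
    have hcov' : ∀ x ∈ xs, g x ∈ cs := fun x hx => hcov x (List.mem_cons_of_mem _ hx)
    have hgv : g v ∈ cs := hcov v (by simp)
    have hre : cs.map (fun c => (((v :: xs).filter (fun x => g x == c)).map (G c)).sum)
        = cs.map (fun c => (if g v = c then G c v else 0)
            + ((xs.filter (fun x => g x == c)).map (G c)).sum) := by
      apply List.map_congr_left
      intro c _
      by_cases h : g v = c <;> simp [h]
    rw [hre, PySem.List.sum_map_add_int, sum_single cs hnd (g v) (fun c => G c v),
        if_pos hgv, ih hcov']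
    simp

-- loop shape: 'if p: skip else: count += S' accumulates a guarded sum
lemma foldl_guard_sum {α : Type} (l : List α) (p : α → Prop) [DecidablePred p]
    (S : α → Int) (acc : Int) :
    l.foldl (fun c x => if p x then c else c + S x) acc
      = acc + (l.map (fun x => if p x then 0 else S x)).sum := by
  induction l generalizing acc with
  | nil => simp
  | cons x l ih =>
    simp only [List.foldl_cons, List.map_cons, List.sum_cons]
    rw [ih]
    by_cases h : p x <;> simp [h] <;> ring

-- loop shape: guarded conditional count
lemma foldl_guard_count {α : Type} (l : List α) (p q : α → Prop)
    [DecidablePred p] [DecidablePred q] (acc : Int) :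
    l.foldl (fun c x => if p x then c else if q x then c + 1 else c) acc
      = acc + (l.map (fun x => if ¬ p x ∧ q x then 1 else 0)).sum := by
  induction l generalizing acc with
  | nil => simp
  | cons x l ih =>
    simp only [List.foldl_cons, List.map_cons, List.sum_cons]
    rw [ih]
    by_cases h1 : p x
    · simp [h1]
    · by_cases h2 : q x <;> simp [h1, h2] <;> ring

-- loop shape: conditional count
lemma foldl_count' {α : Type} (l : List α) (q : α → Prop) [DecidablePred q] (acc : Int) :
    l.foldl (fun c x => if q x then c + 1 else c) acc
      = acc + (l.map (fun x => if q x then 1 else 0)).sum := by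
  induction l generalizing acc with
  | nil => simp
  | cons x l ih =>
    simp only [List.foldl_cons, List.map_cons, List.sum_cons]
    rw [ih]
    by_cases h : q x <;> simp [h] <;> ring

-- regrouping of the three-way color test: the wedge colors match iff w lands in v's bucket
lemma ite_regroup (v w A B C : Int) :
    (if v < w ∧ (A = B ∧ B = C) then (1:Int) else 0)
      = (if B = A then (if v < w ∧ C = A then (1:Int) else 0) else 0) := by
  by_cases h2 : A = B
  · subst h2
    by_cases h3 : A = C
    · subst h3; simp
    · simp [h3, Ne.symm h3]
  · simp [h2, Ne.symm h2]

-- the per-vertex step of A equals the per-vertex step of B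
lemma step_eq (coloring : List (Int × Int × Int)) (u : Int) (row : List (Int × Int)) (acc : Int) :
    row.foldl (fun count p =>
      if p.1 ≤ u then count else
        row.foldl (fun count q =>
          if q.1 ≤ p.1 then count else
            if cget coloring (min u p.1) (max u p.1) = cget coloring (min u q.1) (max u q.1) ∧
               cget coloring (min u q.1) (max u q.1) = cget coloring (min p.1 q.1) (max p.1 q.1)
            then count + 1 else count) count) acc
    = ((((row.filter (fun p => u < p.1)).map (fun p => (cget coloring u p.1, p.1))).foldl
          (fun d p => d.modify p.1 ([] : List Int) (· ++ [p.2])) PySem.Dict.empty).items).foldl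
        (fun total cv =>
          cv.2.foldl (fun total v =>
            cv.2.foldl (fun total w =>
              if v < w ∧ cget coloring v w = cv.1 then total + 1 else total) total) total) acc := by
  -- membership fact: everything in the filtered list is a forward neighbor
  have hmem : ∀ p ∈ (row.filter (fun p => u < p.1)), u < p.1 := by
    intro p hp
    have := List.mem_filter.mp hp
    simpa using this.2
  -- ===== A side =====
  have hA1 : row.foldl (fun count p => if p.1 ≤ u then count else row.foldl (fun count q => if q.1 ≤ p.1 then count else if cget coloring (min u p.1) (max u p.1) = cget coloring (min u q.1) (max u q.1) ∧ cget coloring (min u q.1) (max u q.1) = cget coloring (min p.1 q.1) (max p.1 q.1) then count + 1 else count) count) acc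
      = row.foldl (fun count p => if p.1 ≤ u then count else count + ((row.map (fun q => if ¬ q.1 ≤ p.1 ∧ (cget coloring (min u p.1) (max u p.1) = cget coloring (min u q.1) (max u q.1) ∧ cget coloring (min u q.1) (max u q.1) = cget coloring (min p.1 q.1) (max p.1 q.1)) then (1:Int) else 0)).sum)) acc := by
    apply PySem.List.foldl_congr_mem'
    intro p _ a
    by_cases h : p.1 ≤ u
    · simp [h]
    · simp only [if_neg h]
      exact foldl_guard_count row (fun q => q.1 ≤ p.1) (fun q => cget coloring (min u p.1) (max u p.1) = cget coloring (min u q.1) (max u q.1) ∧ cget coloring (min u q.1) (max u q.1) = cget coloring (min p.1 q.1) (max p.1 q.1)) a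
  have hA2 : row.foldl (fun count p => if p.1 ≤ u then count else count + ((row.map (fun q => if ¬ q.1 ≤ p.1 ∧ (cget coloring (min u p.1) (max u p.1) = cget coloring (min u q.1) (max u q.1) ∧ cget coloring (min u q.1) (max u q.1) = cget coloring (min p.1 q.1) (max p.1 q.1)) then (1:Int) else 0)).sum)) acc
      = acc + (row.map (fun p => if p.1 ≤ u then 0 else ((row.map (fun q => if ¬ q.1 ≤ p.1 ∧ (cget coloring (min u p.1) (max u p.1) = cget coloring (min u q.1) (max u q.1) ∧ cget coloring (min u q.1) (max u q.1) = cget coloring (min p.1 q.1) (max p.1 q.1)) then (1:Int) else 0)).sum))).sum :=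
    foldl_guard_sum row (fun p => p.1 ≤ u) (fun p => ((row.map (fun q => if ¬ q.1 ≤ p.1 ∧ (cget coloring (min u p.1) (max u p.1) = cget coloring (min u q.1) (max u q.1) ∧ cget coloring (min u q.1) (max u q.1) = cget coloring (min p.1 q.1) (max p.1 q.1)) then (1:Int) else 0)).sum)) acc
  have hA3 : (row.map (fun p => if p.1 ≤ u then 0 else ((row.map (fun q => if ¬ q.1 ≤ p.1 ∧ (cget coloring (min u p.1) (max u p.1) = cget coloring (min u q.1) (max u q.1) ∧ cget coloring (min u q.1) (max u q.1) = cget coloring (min p.1 q.1) (max p.1 q.1)) then (1:Int) else 0)).sum))).sum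
      = ((row.filter (fun p => u < p.1)).map (fun p => ((row.map (fun q => if ¬ q.1 ≤ p.1 ∧ (cget coloring (min u p.1) (max u p.1) = cget coloring (min u q.1) (max u q.1) ∧ cget coloring (min u q.1) (max u q.1) = cget coloring (min p.1 q.1) (max p.1 q.1)) then (1:Int) else 0)).sum))).sum := by
    have hpt : row.map (fun p => if p.1 ≤ u then 0 else ((row.map (fun q => if ¬ q.1 ≤ p.1 ∧ (cget coloring (min u p.1) (max u p.1) = cget coloring (min u q.1) (max u q.1) ∧ cget coloring (min u q.1) (max u q.1) = cget coloring (min p.1 q.1) (max p.1 q.1)) then (1:Int) else 0)).sum))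
        = row.map (fun p => if u < p.1 then ((row.map (fun q => if ¬ q.1 ≤ p.1 ∧ (cget coloring (min u p.1) (max u p.1) = cget coloring (min u q.1) (max u q.1) ∧ cget coloring (min u q.1) (max u q.1) = cget coloring (min p.1 q.1) (max p.1 q.1)) then (1:Int) else 0)).sum) else 0) := by
      apply List.map_congr_left
      intro p _
      by_cases h : p.1 ≤ u
      · simp [h, not_lt.mpr h]
      · simp [h, not_le.mp h]
    rw [hpt]
    exact sum_ite_filter row (fun p => u < p.1) (fun p => ((row.map (fun q => if ¬ q.1 ≤ p.1 ∧ (cget coloring (min u p.1) (max u p.1) = cget coloring (min u q.1) (max u q.1) ∧ cget coloring (min u q.1) (max u q.1) = cget coloring (min p.1 q.1) (max p.1 q.1)) then (1:Int) else 0)).sum))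
  have hA4 : ∀ p ∈ (row.filter (fun p => u < p.1)), ((row.map (fun q => if ¬ q.1 ≤ p.1 ∧ (cget coloring (min u p.1) (max u p.1) = cget coloring (min u q.1) (max u q.1) ∧ cget coloring (min u q.1) (max u q.1) = cget coloring (min p.1 q.1) (max p.1 q.1)) then (1:Int) else 0)).sum) = ((((row.filter (fun p => u < p.1)).map (fun p => p.1)).map (fun w => if p.1 < w ∧ (cget coloring u p.1 = cget coloring u w ∧ cget coloring u w = cget coloring p.1 w) then (1:Int) else 0)).sum) := by
    intro p hp
    have hv : u < p.1 := hmem p hp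
    have hpt : row.map (fun q => if ¬ q.1 ≤ p.1 ∧ (cget coloring (min u p.1) (max u p.1) = cget coloring (min u q.1) (max u q.1) ∧ cget coloring (min u q.1) (max u q.1) = cget coloring (min p.1 q.1) (max p.1 q.1)) then 1 else 0)
        = row.map (fun q => if u < q.1 then (if p.1 < q.1 ∧ (cget coloring u p.1 = cget coloring u q.1 ∧ cget coloring u q.1 = cget coloring p.1 q.1) then (1:Int) else 0) else 0) := by
      apply List.map_congr_left
      intro q _
      by_cases h1 : p.1 < q.1
      · have hu1 : u < q.1 := hv.trans h1
        rw [min_eq_left hv.le, max_eq_right hv.le, min_eq_left hu1.le, max_eq_right hu1.le,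
            min_eq_left h1.le, max_eq_right h1.le]
        simp [h1, hu1, not_le]
      · have h2 : q.1 ≤ p.1 := not_lt.mp h1
        simp [h1, h2]
    rw [hpt, sum_ite_filter row (fun q => u < q.1)
          (fun q => if p.1 < q.1 ∧ (cget coloring u p.1 = cget coloring u q.1 ∧ cget coloring u q.1 = cget coloring p.1 q.1) then (1:Int) else 0)]
    rw [List.map_map]
    rfl
  have hA : row.foldl (fun count p => if p.1 ≤ u then count else row.foldl (fun count q => if q.1 ≤ p.1 then count else if cget coloring (min u p.1) (max u p.1) = cget coloring (min u q.1) (max u q.1) ∧ cget coloring (min u q.1) (max u q.1) = cget coloring (min p.1 q.1) (max p.1 q.1) then count + 1 else count) count) acc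
      = acc + (((row.filter (fun p => u < p.1)).map (fun p => p.1)).map (fun v => ((((row.filter (fun p => u < p.1)).map (fun p => p.1)).map (fun w => if v < w ∧ (cget coloring u v = cget coloring u w ∧ cget coloring u w = cget coloring v w) then (1:Int) else 0)).sum))).sum := by
    rw [hA1, hA2, hA3, List.map_congr_left hA4]
    simp only [List.map_map]
    rfl
  -- ===== B side =====
  have hnodup : (((row.filter (fun p => u < p.1)).map (fun p => (cget coloring u p.1, p.1))).foldl (fun d p => d.modify p.1 ([] : List Int) (· ++ [p.2])) PySem.Dict.empty).keys.Nodup := by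
    apply PySem.Dict.nodup_keys_foldl_modify_key
    simp [PySem.Dict.keys_empty]
  have hkeys : (((row.filter (fun p => u < p.1)).map (fun p => (cget coloring u p.1, p.1))).foldl (fun d p => d.modify p.1 ([] : List Int) (· ++ [p.2])) PySem.Dict.empty).keys = (PySem.Set.ofList (((row.filter (fun p => u < p.1)).map (fun p => p.1)).map (fun v => cget coloring u v))) := by
    rw [PySem.Dict.keys_foldl_modify_key]
    simp [PySem.Dict.keys_empty, PySem.Set.update_nil_left, List.map_map]
    rfl
  have hfilters : ∀ c : Int, (((row.filter (fun p => u < p.1)).map (fun p => (cget coloring u p.1, p.1))).foldl (fun d p => d.modify p.1 ([] : List Int) (· ++ [p.2])) PySem.Dict.empty).getD c [] = ((row.filter (fun p => u < p.1)).map (fun p => p.1)).filter (fun x => cget coloring u x == c) := by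
    intro c
    rw [PySem.Dict.getD_foldl_modify_append]
    simp [PySem.Dict.getD_empty, List.filter_map, List.map_map]
  have hitems : (((row.filter (fun p => u < p.1)).map (fun p => (cget coloring u p.1, p.1))).foldl (fun d p => d.modify p.1 ([] : List Int) (· ++ [p.2])) PySem.Dict.empty).items = (PySem.Set.ofList (((row.filter (fun p => u < p.1)).map (fun p => p.1)).map (fun v => cget coloring u v))).map (fun c => (c, ((row.filter (fun p => u < p.1)).map (fun p => p.1)).filter (fun x => cget coloring u x == c))) := by
    rw [PySem.Dict.items_eq_map_keys (((row.filter (fun p => u < p.1)).map (fun p => (cget coloring u p.1, p.1))).foldl (fun d p => d.modify p.1 ([] : List Int) (· ++ [p.2])) PySem.Dict.empty) hnodup [], hkeys]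
    apply List.map_congr_left
    intro c _
    rw [hfilters c]
  have hcv : ∀ (cv : Int × List Int) (a : Int),
      cv.2.foldl (fun total v => cv.2.foldl (fun total w => if v < w ∧ cget coloring v w = cv.1 then total + 1 else total) total) a
        = a + (fun cv => (cv.2.map (fun v => (cv.2.map (fun w => if v < w ∧ cget coloring v w = cv.1 then (1:Int) else 0)).sum)).sum) cv := by
    intro cv a
    have hin : cv.2.foldl (fun total v => cv.2.foldl (fun total w => if v < w ∧ cget coloring v w = cv.1 then total + 1 else total) total) a
        = cv.2.foldl (fun total v => total + (cv.2.map (fun w => if v < w ∧ cget coloring v w = cv.1 then (1:Int) else 0)).sum) a := by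
      apply PySem.List.foldl_congr_mem'
      intro v _ b
      exact foldl_count' cv.2 (fun w => v < w ∧ cget coloring v w = cv.1) b
    rw [hin]
    exact PySem.List.foldl_add cv.2 (fun v => (cv.2.map (fun w => if v < w ∧ cget coloring v w = cv.1 then (1:Int) else 0)).sum) a
  have hB1 : (((row.filter (fun p => u < p.1)).map (fun p => (cget coloring u p.1, p.1))).foldl (fun d p => d.modify p.1 ([] : List Int) (· ++ [p.2])) PySem.Dict.empty).items.foldl (fun total cv => cv.2.foldl (fun total v => cv.2.foldl (fun total w => if v < w ∧ cget coloring v w = cv.1 then total + 1 else total) total) total) acc = acc + ((((row.filter (fun p => u < p.1)).map (fun p => (cget coloring u p.1, p.1))).foldl (fun d p => d.modify p.1 ([] : List Int) (· ++ [p.2])) PySem.Dict.empty).items.map (fun cv => (cv.2.map (fun v => (cv.2.map (fun w => if v < w ∧ cget coloring v w = cv.1 then (1:Int) else 0)).sum)).sum)).sum := by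
    have h1 : (((row.filter (fun p => u < p.1)).map (fun p => (cget coloring u p.1, p.1))).foldl (fun d p => d.modify p.1 ([] : List Int) (· ++ [p.2])) PySem.Dict.empty).items.foldl (fun total cv => cv.2.foldl (fun total v => cv.2.foldl (fun total w => if v < w ∧ cget coloring v w = cv.1 then total + 1 else total) total) total) acc
        = (((row.filter (fun p => u < p.1)).map (fun p => (cget coloring u p.1, p.1))).foldl (fun d p => d.modify p.1 ([] : List Int) (· ++ [p.2])) PySem.Dict.empty).items.foldl (fun total cv => total + (fun cv => (cv.2.map (fun v => (cv.2.map (fun w => if v < w ∧ cget coloring v w = cv.1 then (1:Int) else 0)).sum)).sum) cv) acc := by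
      apply PySem.List.foldl_congr_mem'
      intro cv _ a
      exact hcv cv a
    rw [h1]
    exact PySem.List.foldl_add _ _ acc
  have hB2 : ((((row.filter (fun p => u < p.1)).map (fun p => (cget coloring u p.1, p.1))).foldl (fun d p => d.modify p.1 ([] : List Int) (· ++ [p.2])) PySem.Dict.empty).items.map (fun cv => (cv.2.map (fun v => (cv.2.map (fun w => if v < w ∧ cget coloring v w = cv.1 then (1:Int) else 0)).sum)).sum)).sum
      = ((PySem.Set.ofList (((row.filter (fun p => u < p.1)).map (fun p => p.1)).map (fun v => cget coloring u v))).map (fun c => ((((row.filter (fun p => u < p.1)).map (fun p => p.1)).filter (fun x => cget coloring u x == c)).map (fun v => (((((row.filter (fun p => u < p.1)).map (fun p => p.1)).filter (fun x => cget coloring u x == c)).map (fun w => if v < w ∧ cget coloring v w = c then (1:Int) else 0)).sum))).sum)).sum := by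
    rw [hitems, List.map_map]
    rfl
  have hB3 : ((PySem.Set.ofList (((row.filter (fun p => u < p.1)).map (fun p => p.1)).map (fun v => cget coloring u v))).map (fun c => ((((row.filter (fun p => u < p.1)).map (fun p => p.1)).filter (fun x => cget coloring u x == c)).map (fun v => (((((row.filter (fun p => u < p.1)).map (fun p => p.1)).filter (fun x => cget coloring u x == c)).map (fun w => if v < w ∧ cget coloring v w = c then (1:Int) else 0)).sum))).sum)).sum
      = (((row.filter (fun p => u < p.1)).map (fun p => p.1)).map (fun v => (((((row.filter (fun p => u < p.1)).map (fun p => p.1)).filter (fun x => cget coloring u x == (cget coloring u v))).map (fun w => if v < w ∧ cget coloring v w = (cget coloring u v) then (1:Int) else 0)).sum))).sum := by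
    apply group_sum (PySem.Set.ofList (((row.filter (fun p => u < p.1)).map (fun p => p.1)).map (fun v => cget coloring u v))) (PySem.Set.nodup_ofList _) ((row.filter (fun p => u < p.1)).map (fun p => p.1)) (fun v => cget coloring u v)
      (fun c v => (((((row.filter (fun p => u < p.1)).map (fun p => p.1)).filter (fun x => cget coloring u x == c)).map (fun w => if v < w ∧ cget coloring v w = c then (1:Int) else 0)).sum))
    intro v hv
    rw [PySem.Set.mem_ofList]
    exact List.mem_map_of_mem hv
  -- ===== the two per-vertex sums agree =====
  have hmid : ∀ v : Int, ((((row.filter (fun p => u < p.1)).map (fun p => p.1)).map (fun w => if v < w ∧ (cget coloring u v = cget coloring u w ∧ cget coloring u w = cget coloring v w) then (1:Int) else 0)).sum) = (((((row.filter (fun p => u < p.1)).map (fun p => p.1)).filter (fun x => cget coloring u x == (cget coloring u v))).map (fun w => if v < w ∧ cget coloring v w = (cget coloring u v) then (1:Int) else 0)).sum) := by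
    intro v
    have hpt : ((row.filter (fun p => u < p.1)).map (fun p => p.1)).map (fun w => if v < w ∧ (cget coloring u v = cget coloring u w ∧ cget coloring u w = cget coloring v w) then (1:Int) else 0)
        = ((row.filter (fun p => u < p.1)).map (fun p => p.1)).map (fun w => if cget coloring u w = cget coloring u v then (if v < w ∧ cget coloring v w = cget coloring u v then (1:Int) else 0) else 0) := by
      apply List.map_congr_left
      intro w _
      exact ite_regroup v w (cget coloring u v) (cget coloring u w) (cget coloring v w)
    rw [hpt, sum_ite_filter ((row.filter (fun p => u < p.1)).map (fun p => p.1)) (fun w => cget coloring u w = cget coloring u v)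
          (fun w => if v < w ∧ cget coloring v w = cget coloring u v then (1:Int) else 0)]
    rfl
  rw [hA, hB1, hB2, hB3]
  congr 1
  exact congrArg List.sum (List.map_congr_left (fun v _ => hmid v))

-- ===== VERDICT (by name: the statement is the Claim_ definition above) =====
theorem count_mono_k3_spec : Claim_equal_count_mono_k3 := by
  intro coloring edges nbrs _
  unfold Spec_count_mono_k3 count_mono_k3 count_mono_k3_alt
  rw [PySem.List.enumerate_eq_map_pyRange nbrs [], List.foldl_map]
  have hlen : PySem.List.len nbrs = (nbrs.length : Int) := by simp [PySem.List.len]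
  rw [hlen]
  apply PySem.List.foldl_congr_mem'
  intro x _ acc
  exact step_eq coloring x (PySem.List.pyGetD nbrs x []) acc
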